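-- pv_equiv track=rewrite | github.com/HubertKaluzny/GSAUltra201808 | 5-Across/solution.py | solution
-- ===== SOURCE A (Python) =====
-- def solution(a, b):
--     copies = 0
--     builtOfA = 0
--
--     while builtOfA < len(a):
--       bLeftOvers = b
--       built = 0
--       nextChar = a[builtOfA]
--       bLeftOvers = bLeftOvers.split(nextChar, 1)
--
--       while len(bLeftOvers) > 1:
--         bLeftOvers = bLeftOvers[1]
--         builtOfA += 1
--         built += 1
--         if builtOfA >= len(a):
--           break
--         nextChar = a[builtOfA]
--         bLeftOvers = bLeftOvers.split(nextChar, 1)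
--       copies += 1
--
--     return copies
-- ===== SOURCE B (Python) =====
-- def solution(a, b):
--     if not a:
--         return 0
--     n = len(b)
--     # next-occurrence table: nxt[p][c] = smallest index j >= p with b[j] == c
--     nxt = [dict() for _ in range(n + 1)]
--     for j in range(n - 1, -1, -1):
--         nxt[j] = dict(nxt[j + 1])
--         nxt[j][b[j]] = j
--     copies = 1
--     pos = 0
--     for c in a:
--         j = nxt[pos].get(c)
--         if j is None:
--             j = nxt[0].get(c)
--             if j is None:
--                 return -1   # c never occurs in b: impossible (A diverges here)
--             copies += 1
--         pos = j + 1
--     return copies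
-- ===== Notes on version B (the rewrite author's own statement) =====
-- stated objective: faster
-- what changed: B precomputes a next-occurrence table over b (one dict per position) and matches a in a single jump-pointer pass, instead of A's nested loops that re-split the remaining b string for every character of a; Pre_ requires every character of a to occur in b, which is exactly A's halting set (elsewhere A loops forever, B returns -1).
import Mathlib
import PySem

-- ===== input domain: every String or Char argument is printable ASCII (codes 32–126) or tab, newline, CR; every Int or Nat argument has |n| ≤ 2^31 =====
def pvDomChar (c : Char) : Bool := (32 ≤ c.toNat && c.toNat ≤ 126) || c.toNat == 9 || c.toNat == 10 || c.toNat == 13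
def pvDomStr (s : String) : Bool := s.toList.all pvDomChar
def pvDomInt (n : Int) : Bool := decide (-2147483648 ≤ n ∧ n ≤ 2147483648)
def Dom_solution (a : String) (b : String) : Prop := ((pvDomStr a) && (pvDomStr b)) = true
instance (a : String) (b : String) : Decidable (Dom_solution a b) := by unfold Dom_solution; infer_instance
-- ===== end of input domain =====

-- B replaces A's repeated re-splitting of b with a precomputed next-occurrence table and a
-- single jump-pointer pass over a (objective: faster by algorithm; equal return values on Pre_).

-- ===== PORT A =====
-- bLeftOvers.split(nextChar, 1): A only uses 'len(parts) > 1' and 'parts[1]', i.e. the part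
-- after the first occurrence of the (single-char) separator; none ↔ separator absent. Exact.
def splitOnce : List Char → Char → Option (List Char)
  | [], _ => none
  | x :: xs, c => if x = c then some xs else splitOnce xs c

-- A's inner while loop: bLeft is the remainder of b after the last successful split,
-- the list argument is the not-yet-built rest of a (builtOfA rendered structurally).
def innerA : List Char → List Char → List Char
  | _, [] => []
  | bLeft, c :: rest =>
    match splitOnce bLeft c with
    | none => c :: rest
    | some r => innerA r rest

-- termination lemma for outerA (cited in its decreasing_by)
theorem innerA_length_le : ∀ (bLeft aRem : List Char), (innerA bLeft aRem).length ≤ aRem.length := by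
  intro bLeft aRem
  induction aRem generalizing bLeft with
  | nil => simp [innerA]
  | cons c rest ih =>
    simp only [innerA]
    cases h : splitOnce bLeft c with
    | none => simp
    | some r => exact Nat.le_succ_of_le (ih r)

-- A's outer while loop over the rest of a, accumulating copies.
def outerA (bL : List Char) : List Char → Int → Int
  | [], copies => copies
  | c :: rest, copies =>
    match splitOnce bL c with
    | none => copies + 1  -- in Python the outer loop makes no progress here and never returns (outside Pre_)
    | some r => outerA bL (innerA r rest) (copies + 1)
termination_by aRem _ => aRem.length
decreasing_by exact Nat.lt_succ_of_le (innerA_length_le r rest)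

def solution (a : String) (b : String) : Int :=
  outerA b.toList a.toList 0

-- ===== PORT B =====
-- nxt built back to front: buildNxt bL j = [nxt_j, …, nxt_n]; dict(nxt[j+1]) then nxt[j][b[j]] = j
-- is PySem.Dict.insert (copy + overwrite-in-place have the same insertion-order semantics).
def buildNxt : List Char → Int → List (PySem.Dict Char Int)
  | [], _ => [PySem.Dict.empty]
  | x :: xs, j =>
    let t := buildNxt xs (j + 1)
    ((t.headD PySem.Dict.empty).insert x j) :: t

-- B's for-loop over a with state (copies, pos); nxt[pos] is always in range, the getD ∅ only totalises.
def loopB (nxt : List (PySem.Dict Char Int)) : List Char → Int → Int → Int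
  | [], copies, _ => copies
  | c :: rest, copies, pos =>
    match ((PySem.List.pyGet? nxt pos).getD PySem.Dict.empty).get? c with
    | some j => loopB nxt rest copies (j + 1)
    | none =>
      match ((PySem.List.pyGet? nxt 0).getD PySem.Dict.empty).get? c with
      | none => -1  -- c never occurs in b: impossible to build a (A never returns here; outside Pre_)
      | some j => loopB nxt rest (copies + 1) (j + 1)

def solution_alt (a : String) (b : String) : Int :=
  if a.toList.isEmpty then 0
  else loopB (buildNxt b.toList 0) a.toList 1 0

-- ===== PRECONDITION & SPEC =====
-- Pre_ is exactly A's halting set: if some character of a never occurs in b, A's outer loop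
-- makes no progress and Python diverges (no return value exists to match).
def Pre_solution (a : String) (b : String) : Prop := (a.toList.all (fun c => b.toList.contains c)) = true
instance (a : String) (b : String) : Decidable (Pre_solution a b) := by unfold Pre_solution; infer_instance
def pvWitness_solution : String × String := ("baab", "ab")

def Spec_solution (a : String) (b : String) (out : Int) : Prop := out = solution_alt a b
instance (a : String) (b : String) (out : Int) : Decidable (Spec_solution a b out) := by unfold Spec_solution; infer_instance

-- ===== CLAIM (what is proved, stated in full; the proofs are below) =====
def Claim_equal_solution : Prop := ∀ (a : String) (b : String), Dom_solution a b → Pre_solution a b → Spec_solution a b (solution a b)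

-- ===== LEMMAS AND PROOFS =====

-- reference greedy count (extra copies beyond the current one), used to relate the two ports
def refF (bL : List Char) : List Char → List Char → Int
  | [], _ => 0
  | c :: rest, bRem =>
    match splitOnce bRem c with
    | some r => refF bL rest r
    | none =>
      match splitOnce bL c with
      | some r => 1 + refF bL rest r
      | none => 0

-- first index ≥ j (as an offset-carrying scan) of c in l
def findFrom : List Char → Int → Char → Option Int
  | [], _, _ => none
  | x :: xs, j, c => if x = c then some j else findFrom xs (j + 1) c

theorem splitOnce_none_iff (l : List Char) (c : Char) : splitOnce l c = none ↔ c ∉ l := by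
  induction l with
  | nil => simp [splitOnce]
  | cons x xs ih =>
    simp only [splitOnce, List.mem_cons]
    by_cases h : x = c
    · simp [h]
    · have h' : ¬ c = x := fun e => h e.symm
      simp [h, h', ih]

theorem findFrom_none_iff (l : List Char) (j : Int) (c : Char) :
    findFrom l j c = none ↔ splitOnce l c = none := by
  induction l generalizing j with
  | nil => simp [findFrom, splitOnce]
  | cons x xs ih =>
    simp only [findFrom, splitOnce]
    by_cases h : x = c
    · simp [h]
    · simp [h, ih]

theorem findFrom_some (l : List Char) (j : Int) (c : Char) (k : Int)
    (h : findFrom l j c = some k) :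
    ∃ m : Nat, k = j + m ∧ m + 1 ≤ l.length ∧ splitOnce l c = some (l.drop (m + 1)) := by
  induction l generalizing j with
  | nil => simp [findFrom] at h
  | cons x xs ih =>
    simp only [findFrom] at h
    by_cases hx : x = c
    · refine ⟨0, ?_, by simp, ?_⟩
      · simp [hx] at h; omega
      · simp [splitOnce, hx]
    · simp only [hx, if_false] at h
      obtain ⟨m, hk, hlen, hsp⟩ := ih (j + 1) h
      refine ⟨m + 1, by push_cast; omega, by simpa using hlen, ?_⟩
      simp [splitOnce, hx, hsp]

theorem buildNxt_ne_nil (l : List Char) (j : Int) : buildNxt l j ≠ [] := by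
  cases l <;> simp [buildNxt]

theorem buildNxt_get (l : List Char) (j : Int) (p : Nat) (hp : p ≤ l.length) (c : Char) :
    (((buildNxt l j)[p]?).getD PySem.Dict.empty).get? c = findFrom (l.drop p) (j + p) c := by
  induction l generalizing j p with
  | nil =>
    have hp0 : p = 0 := by simpa using hp
    subst hp0
    simp [buildNxt, findFrom, PySem.Dict.get?_empty]
  | cons x xs ih =>
    cases p with
    | zero =>
      have hhead : ((buildNxt xs (j + 1)).headD PySem.Dict.empty)
          = ((buildNxt xs (j + 1))[0]?).getD PySem.Dict.empty := by
        cases h : buildNxt xs (j + 1) with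
        | nil => exact absurd h (buildNxt_ne_nil xs (j + 1))
        | cons d t => simp
      simp only [buildNxt, List.getElem?_cons_zero, Option.getD_some, List.drop_zero, findFrom]
      rw [PySem.Dict.get?_insert, hhead, ih (j + 1) 0 (by simp)]
      simp only [List.drop_zero, Nat.cast_zero, add_zero]
      by_cases h : x = c
      · simp [h]
      · have h' : ¬ c = x := fun e => h e.symm
        simp [h, h']
    | succ p' =>
      simp only [buildNxt, List.getElem?_cons_succ, List.drop_succ_cons]
      rw [ih (j + 1) p' (by simpa using hp)]
      congr 1
      push_cast
      ring

theorem loopB_eq (bL : List Char) (aRem : List Char) :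
    (∀ c ∈ aRem, c ∈ bL) → ∀ (p : Nat), p ≤ bL.length → ∀ (copies : Int),
    loopB (buildNxt bL 0) aRem copies (p : Int) = copies + refF bL aRem (bL.drop p) := by
  induction aRem with
  | nil => intro _ p hp copies; simp [loopB, refF]
  | cons c rest ih =>
    intro h p hp copies
    have hc : c ∈ bL := h c (by simp)
    have hrest : ∀ x ∈ rest, x ∈ bL := fun x hx => h x (by simp [hx])
    have hlook : ((PySem.List.pyGet? (buildNxt bL 0) (p : Int)).getD PySem.Dict.empty).get? c
        = findFrom (bL.drop p) (p : Int) c := by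
      rw [PySem.List.pyGet?_natCast, buildNxt_get bL 0 p hp c]; ring_nf
    have hlook0 : ((PySem.List.pyGet? (buildNxt bL 0) 0).getD PySem.Dict.empty).get? c
        = findFrom bL 0 c := by
      have h1 : PySem.List.pyGet? (buildNxt bL 0) 0 = (buildNxt bL 0)[0]? := by
        simpa using PySem.List.pyGet?_natCast (buildNxt bL 0) 0
      rw [h1]
      simpa using buildNxt_get bL 0 0 (by simp) c
    cases hf : findFrom (bL.drop p) (p : Int) c with
    | some k =>
      obtain ⟨m, hk, hm, hsp⟩ := findFrom_some _ _ _ _ hf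
      rw [List.drop_drop] at hsp
      have hcast : k + 1 = ((p + m + 1 : Nat) : Int) := by push_cast; omega
      simp only [loopB, hlook, hf]
      rw [hcast, ih hrest (p + m + 1) (by simp at hm; omega) copies]
      have heq : p + (m + 1) = p + m + 1 := by omega
      rw [heq] at hsp
      simp [refF, hsp]
    | none =>
      have hspn : splitOnce (bL.drop p) c = none := (findFrom_none_iff _ _ _).mp hf
      cases hf0 : findFrom bL 0 c with
      | none =>
        exact absurd ((splitOnce_none_iff bL c).mp ((findFrom_none_iff _ _ _).mp hf0)) (by simp [hc])
      | some k0 =>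
        obtain ⟨m0, hk0, hm0, hsp0⟩ := findFrom_some _ _ _ _ hf0
        have hcast : k0 + 1 = ((m0 + 1 : Nat) : Int) := by push_cast; omega
        simp only [loopB, hlook, hf, hlook0, hf0]
        rw [hcast, ih hrest (m0 + 1) (by omega) (copies + 1)]
        simp [refF, hspn, hsp0]
        ring

theorem outerA_inner_eq (bL : List Char) (aRem : List Char) :
    (∀ c ∈ aRem, c ∈ bL) → ∀ (bRem : List Char) (copies : Int),
    outerA bL (innerA bRem aRem) (copies + 1) = copies + 1 + refF bL aRem bRem := by
  induction aRem with
  | nil => intro _ bRem copies; simp [innerA, outerA, refF]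
  | cons c rest ih =>
    intro h bRem copies
    have hc : c ∈ bL := h c (by simp)
    have hrest : ∀ x ∈ rest, x ∈ bL := fun x hx => h x (by simp [hx])
    cases hsp : splitOnce bRem c with
    | some r =>
      simp only [innerA, hsp]
      rw [ih hrest r copies]
      simp [refF, hsp]
    | none =>
      simp only [innerA, hsp]
      cases hsp0 : splitOnce bL c with
      | none => exact absurd ((splitOnce_none_iff bL c).mp hsp0) (by simp [hc])
      | some r0 =>
        rw [outerA]
        simp only [hsp0]
        rw [ih hrest r0 (copies + 1)]
        simp [refF, hsp, hsp0]
        ring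

-- ===== VERDICT (by name: the statement is the Claim_ definition above) =====
theorem solution_spec : Claim_equal_solution := by
  unfold Claim_equal_solution
  intro a b _ hpre
  unfold Spec_solution solution solution_alt
  unfold Pre_solution at hpre
  have hpre' : ∀ c ∈ a.toList, c ∈ b.toList := by simpa using hpre
  clear hpre
  cases ha : a.toList with
  | nil => simp [outerA]
  | cons c rest =>
    rw [ha] at hpre'
    simp only [List.isEmpty_cons, Bool.false_eq_true, if_false]
    have hc : c ∈ b.toList := hpre' c (by simp)
    have hrest : ∀ x ∈ rest, x ∈ b.toList := fun x hx => hpre' x (by simp [hx])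
    cases hsp : splitOnce b.toList c with
    | none => exact absurd ((splitOnce_none_iff _ c).mp hsp) (by simp [hc])
    | some r0 =>
      rw [outerA]
      simp only [hsp]
      rw [outerA_inner_eq b.toList rest hrest r0 0]
      have hB := loopB_eq b.toList (c :: rest) hpre' 0 (by simp) 1
      simp only [Nat.cast_zero, List.drop_zero] at hB
      rw [hB]
      simp [refF, hsp]
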